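-- pv_equiv track=rewrite | github.com/leandrocouto/cant_stop | players/DSL_glenn_player.py | get_cols_weights
-- ===== SOURCE A (Python) =====
-- def get_cols_weights(action):
--     value = 0
--     for col in action:
--         if col in [2, 12]:
--             value += 7
--         elif col in [3, 11]:
--             value += 0
--         elif col in [4, 10]:
--             value += 2
--         elif col in [5, 9]:
--             value += 0
--         elif col in [6, 8]:
--             value += 4
--         else:
--             value += 3
--     return value
-- ===== SOURCE B (Python) =====
-- def get_cols_weights(action):
--     WEIGHTS = {2: 7, 12: 7, 4: 2, 10: 2, 6: 4, 8: 4, 3: 0, 11: 0, 5: 0, 9: 0}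
--     counts = {}
--     for col in action:
--         counts[col] = counts.get(col, 0) + 1
--     total = 0
--     for v, n in counts.items():
--         total += n * WEIGHTS.get(v, 3)
--     return total
-- ===== Notes on version B (the rewrite author's own statement) =====
-- stated objective: alternative
-- what changed: Replaces the per-element if/elif weight chain with a frequency table built in one pass plus a weighted sum n*weight over the distinct column values looked up in a weight dict.
import Mathlib
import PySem

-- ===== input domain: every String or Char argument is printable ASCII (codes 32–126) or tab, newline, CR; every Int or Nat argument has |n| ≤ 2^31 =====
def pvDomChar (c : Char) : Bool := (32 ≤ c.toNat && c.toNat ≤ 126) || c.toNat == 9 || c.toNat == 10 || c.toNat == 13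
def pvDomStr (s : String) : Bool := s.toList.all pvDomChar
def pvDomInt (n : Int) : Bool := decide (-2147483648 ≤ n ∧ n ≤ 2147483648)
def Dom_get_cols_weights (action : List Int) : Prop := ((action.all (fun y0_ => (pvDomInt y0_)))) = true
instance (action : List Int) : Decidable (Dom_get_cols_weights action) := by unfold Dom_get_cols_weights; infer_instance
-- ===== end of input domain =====

-- B replaces A's per-element if/elif chain by a frequency table plus a weighted sum over distinct values (alternative decomposition, same cost).

-- ===== PORT A =====
def get_cols_weights (action : List Int) : Int :=
  action.foldl (fun value col =>
    if ([2, 12] : List Int).contains col then value + 7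
    else if ([3, 11] : List Int).contains col then value + 0
    else if ([4, 10] : List Int).contains col then value + 2
    else if ([5, 9] : List Int).contains col then value + 0
    else if ([6, 8] : List Int).contains col then value + 4
    else value + 3) 0

-- ===== PORT B =====
def pvWEIGHTS : PySem.Dict Int Int :=
  PySem.Dict.ofList [(2, 7), (12, 7), (4, 2), (10, 2), (6, 4), (8, 4), (3, 0), (11, 0), (5, 0), (9, 0)]

def get_cols_weights_alt (action : List Int) : Int :=
  let counts := action.foldl (fun d col => d.modify col 0 (· + 1)) PySem.Dict.empty
  counts.items.foldl (fun total p => total + p.2 * pvWEIGHTS.getD p.1 3) 0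

-- ===== PRECONDITION & SPEC =====
def Spec_get_cols_weights (action : List Int) (out : Int) : Prop := out = get_cols_weights_alt action
instance (action : List Int) (out : Int) : Decidable (Spec_get_cols_weights action out) := by unfold Spec_get_cols_weights; infer_instance

-- ===== CLAIM (what is proved, stated in full; the proofs are below) =====
def Claim_equal_get_cols_weights : Prop := ∀ (action : List Int), Dom_get_cols_weights action → Spec_get_cols_weights action (get_cols_weights action)

-- ===== LEMMAS AND PROOFS =====

-- the per-column weight, as a function (proof-side abbreviation of both lookups)
def pvW (c : Int) : Int :=
  if c = 2 ∨ c = 12 then 7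
  else if c = 3 ∨ c = 11 then 0
  else if c = 4 ∨ c = 10 then 2
  else if c = 5 ∨ c = 9 then 0
  else if c = 6 ∨ c = 8 then 4
  else 3

lemma a_eq_sum (action : List Int) : get_cols_weights action = (action.map pvW).sum := by
  have h : get_cols_weights action
      = action.foldl (fun value col => value + pvW col) 0 := by
    unfold get_cols_weights
    congr 1
    funext value col
    simp [pvW, List.contains_eq_mem]
    split_ifs <;> simp_all
  rw [h, PySem.List.foldl_add]
  simp

lemma weights_getD (c : Int) : pvWEIGHTS.getD c 3 = pvW c := by
  by_cases h2 : (2 : Int) = c; · subst h2; decide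
  by_cases h12 : (12 : Int) = c; · subst h12; decide
  by_cases h4 : (4 : Int) = c; · subst h4; decide
  by_cases h10 : (10 : Int) = c; · subst h10; decide
  by_cases h6 : (6 : Int) = c; · subst h6; decide
  by_cases h8 : (8 : Int) = c; · subst h8; decide
  by_cases h3 : (3 : Int) = c; · subst h3; decide
  by_cases h11 : (11 : Int) = c; · subst h11; decide
  by_cases h5 : (5 : Int) = c; · subst h5; decide
  by_cases h9 : (9 : Int) = c; · subst h9; decide
  have hmk : pvWEIGHTS = PySem.Dict.mk [(2, 7), (12, 7), (4, 2), (10, 2), (6, 4), (8, 4), (3, 0), (11, 0), (5, 0), (9, 0)] := by decide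
  rw [hmk, PySem.Dict.getD_eq_get?_getD]
  simp only [PySem.Dict.get?_mk_cons, beq_iff_eq,
    if_neg h2, if_neg h12, if_neg h4, if_neg h10, if_neg h6, if_neg h8,
    if_neg h3, if_neg h11, if_neg h5, if_neg h9]
  simp only [pvW]
  split_ifs <;> first | omega | simp [PySem.Dict.get?]

lemma ite_sum (ks : List Int) (x : Int) (hnd : ks.Nodup) (hx : x ∈ ks) :
    (ks.map (fun k => if x = k then pvW k else 0)).sum = pvW x := by
  induction ks with
  | nil => cases hx
  | cons k ks ih =>
    simp only [List.map_cons, List.sum_cons]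
    rcases List.mem_cons.mp hx with rfl | hmem
    · have : (ks.map (fun j => if x = j then pvW j else 0)).sum = 0 := by
        apply List.sum_eq_zero
        intro y hy
        obtain ⟨j, hj, rfl⟩ := List.mem_map.mp hy
        have : x ≠ j := fun h => (List.nodup_cons.mp hnd).1 (h ▸ hj)
        simp [this]
      simp [this]
    · have hne : x ≠ k := fun h => (List.nodup_cons.mp hnd).1 (h ▸ hmem)
      rw [if_neg hne, ih (List.nodup_cons.mp hnd).2 hmem]
      ring

lemma grouped_sum (ks xs : List Int) (hnd : ks.Nodup) (hsub : ∀ x ∈ xs, x ∈ ks) :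
    (ks.map (fun k => (xs.count k : Int) * pvW k)).sum = (xs.map pvW).sum := by
  induction xs with
  | nil => simp
  | cons x xs ih =>
    have hsub' : ∀ y ∈ xs, y ∈ ks := fun y hy => hsub y (List.mem_cons_of_mem _ hy)
    have hx : x ∈ ks := hsub x List.mem_cons_self
    have hcount : ∀ k : Int, ((x :: xs).count k : Int) * pvW k
        = (xs.count k : Int) * pvW k + (if x = k then pvW k else 0) := by
      intro k
      by_cases h : x = k <;> simp [h] <;> ring
    calc (ks.map (fun k => ((x :: xs).count k : Int) * pvW k)).sum
        = (ks.map (fun k => (xs.count k : Int) * pvW k + (if x = k then pvW k else 0))).sum := by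
          simp only [hcount]
      _ = (ks.map (fun k => (xs.count k : Int) * pvW k)).sum
          + (ks.map (fun k => if x = k then pvW k else 0)).sum := by
          rw [← List.sum_map_add]
      _ = (xs.map pvW).sum + pvW x := by rw [ih hsub', ite_sum ks x hnd hx]
      _ = ((x :: xs).map pvW).sum := by simp; ring

lemma b_eq_grouped (action : List Int) :
    get_cols_weights_alt action
      = ((PySem.Set.ofList action).map (fun k => (action.count k : Int) * pvW k)).sum := by
  unfold get_cols_weights_alt
  rw [← PySem.Dict.counter_eq_foldl, PySem.List.foldl_add, PySem.Dict.items_counter]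
  simp [List.map_map, Function.comp_def, weights_getD]

-- ===== VERDICT (by name: the statement is the Claim_ definition above) =====
theorem get_cols_weights_spec : Claim_equal_get_cols_weights := by
  intro action _
  show get_cols_weights action = get_cols_weights_alt action
  rw [a_eq_sum, b_eq_grouped]
  exact (grouped_sum (PySem.Set.ofList action) action (PySem.Set.nodup_ofList action)
    (fun x hx => (PySem.Set.mem_ofList action x).mpr hx)).symm
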